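-- pv_equiv track=rewrite | github.com/occrg/Natural-Language-Processing-in-IP-HR-Law | src/lib/tokenise.py | removeStopstrings
-- ===== SOURCE A (Python) =====
-- def removeStopstrings(words, stopstrings):
--     """
--     Removes all words that contain any elements of ${stopstrings} from
--     ${words}.
--     Arguments:
--     words           ([str])
--             -- a list of words
--     stopstrings     ([str])
--             -- a list of strings that indicate a word should be removed
--                if the string is contained in that word
--
--     Returns:
--     wordsWOstops    ([str])
--             -- the first list with the appropriate words removed
--     """
--     wordsWOstops = []
--     for w in words:
--         stopInW = False
--         for string in stopstrings:
--             if string in w: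
--                 stopInW = True
--         if not stopInW:
--             wordsWOstops.append(w)
--     return wordsWOstops
-- ===== SOURCE B (Python) =====
-- def removeStopstrings(words, stopstrings):
--     # Loop order swapped: successively filter the surviving words by each
--     # stopstring, instead of scanning all stopstrings for each word.
--     surviving = list(words)
--     for s in stopstrings:
--         surviving = [w for w in surviving if s not in w]
--     return surviving
-- ===== Notes on version B (the rewrite author's own statement) =====
-- stated objective: alternative
-- what changed: B swaps the loop nesting: instead of testing every stopstring against each word with a flag, it iterates over the stopstrings and filters the shrinking list of surviving words by one stopstring at a time.
import Mathlib
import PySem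

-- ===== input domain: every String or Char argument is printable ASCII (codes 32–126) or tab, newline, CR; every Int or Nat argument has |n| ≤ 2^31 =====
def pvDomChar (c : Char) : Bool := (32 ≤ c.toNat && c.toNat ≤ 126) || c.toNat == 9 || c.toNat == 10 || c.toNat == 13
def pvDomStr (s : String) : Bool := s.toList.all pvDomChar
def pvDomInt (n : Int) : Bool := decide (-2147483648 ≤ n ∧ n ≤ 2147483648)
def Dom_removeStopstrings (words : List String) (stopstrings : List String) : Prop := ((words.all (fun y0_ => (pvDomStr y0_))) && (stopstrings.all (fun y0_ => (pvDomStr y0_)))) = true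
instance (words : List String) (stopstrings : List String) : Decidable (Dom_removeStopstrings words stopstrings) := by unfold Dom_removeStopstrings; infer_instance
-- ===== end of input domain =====

-- B swaps the loop nesting: it filters the surviving word list by one stopstring at a time (alternative decomposition, same worst-case cost).


-- ===== PORT A =====
def removeStopstrings (words : List String) (stopstrings : List String) : List String :=
  words.foldl (fun wordsWOstops w =>
    let stopInW := stopstrings.foldl (fun stopInW s =>
      if PySem.Str.isIn s w then true else stopInW) false
    if !stopInW then wordsWOstops ++ [w] else wordsWOstops) []

-- ===== PORT B =====
def removeStopstrings_alt (words : List String) (stopstrings : List String) : List String :=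
  stopstrings.foldl (fun surviving s =>
    surviving.filter (fun w => !(PySem.Str.isIn s w))) words

-- ===== PRECONDITION & SPEC =====
def Spec_removeStopstrings (words : List String) (stopstrings : List String) (out : List String) : Prop := out = removeStopstrings_alt words stopstrings
instance (words : List String) (stopstrings : List String) (out : List String) : Decidable (Spec_removeStopstrings words stopstrings out) := by unfold Spec_removeStopstrings; infer_instance

-- ===== CLAIM (what is proved, stated in full; the proofs are below) =====
def Claim_equal_removeStopstrings : Prop := ∀ (words : List String) (stopstrings : List String), Dom_removeStopstrings words stopstrings → Spec_removeStopstrings words stopstrings (removeStopstrings words stopstrings)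

-- ===== LEMMAS AND PROOFS =====
-- B's fold of successive filters = one filter by "no stopstring occurs in w".
lemma alt_eq_filter (stopstrings ws : List String) :
    stopstrings.foldl (fun surviving s =>
      surviving.filter (fun w => !(PySem.Str.isIn s w))) ws
    = ws.filter (fun w => stopstrings.all (fun s => !(PySem.Str.isIn s w))) := by
  induction stopstrings generalizing ws with
  | nil => simp
  | cons s rest ih =>
    simp only [List.foldl_cons, ih, List.filter_filter, List.all_cons]
    simp [Bool.and_comm]

-- A's inner flag loop computes "some stopstring occurs in w".
lemma flag_eq_any (stopstrings : List String) (w : String) (b : Bool) :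
    stopstrings.foldl (fun stopInW s =>
      if PySem.Str.isIn s w then true else stopInW) b
    = (b || stopstrings.any (fun s => PySem.Str.isIn s w)) := by
  induction stopstrings generalizing b with
  | nil => simp
  | cons s rest ih =>
    simp only [List.foldl_cons, List.any_cons, ih]
    cases h : PySem.Str.isIn s w <;> simp

-- A's conditional-append loop is a filter.
lemma foldl_append_filter (p : String → Bool) (ws acc : List String) :
    ws.foldl (fun acc w => if p w then acc ++ [w] else acc) acc = acc ++ ws.filter p := by
  induction ws generalizing acc with
  | nil => simp
  | cons w rest ih =>
    rw [List.foldl_cons, ih, List.filter_cons]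
    by_cases h : p w = true <;> simp [h]

-- ===== VERDICT (by name: the statement is the Claim_ definition above) =====
theorem removeStopstrings_spec : Claim_equal_removeStopstrings := by
  intro words stopstrings _
  unfold Spec_removeStopstrings removeStopstrings removeStopstrings_alt
  rw [alt_eq_filter]
  have hfun : (fun (wordsWOstops : List String) (w : String) =>
      let stopInW := stopstrings.foldl (fun stopInW s =>
        if PySem.Str.isIn s w then true else stopInW) false
      if !stopInW then wordsWOstops ++ [w] else wordsWOstops)
      = (fun acc w => if stopstrings.all (fun s => !(PySem.Str.isIn s w)) then acc ++ [w] else acc) := by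
    funext acc w
    simp only [flag_eq_any, Bool.false_or, List.all_eq_not_any_not, Bool.not_not]
  rw [hfun, foldl_append_filter]
  simp
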